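-- pv_equiv track=rewrite | github.com/AndreasDeceuninck/De_Keyser | De_keyser/Keyence/src/Keyence.py | find_max_min_indices
-- ===== SOURCE A (Python) =====
-- def find_max_min_indices(values_filtered, derivative, threshold_derivative):
--     max_indices = []
--     min_indices = []
--
--     # Itereer over de waarden van values_filtered en vind de indexpunten van de maxima en minima van de eerste afgeleide
--     for i in range(1, len(values_filtered) - 1):
--         if derivative[i] > threshold_derivative and derivative[i] > derivative[i - 1] and derivative[i] > derivative[i + 1]:
--             max_indices.append(i)
--         elif derivative[i] < -threshold_derivative and derivative[i] < derivative[i - 1] and derivative[i] < derivative[i + 1]: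
--             min_indices.append(i)
--
--     # Itereer over de maximale indices
--     i = 0
--     while i < len(max_indices) - 1:
--         max_index = max_indices[i]
--         next_max_index = max_indices[i + 1]
--
--         # Controleer of er een minimale index tussen zit
--         min_between = False
--         for min_index in min_indices:
--             if max_index < min_index < next_max_index:
--                 min_between = True
--                 break
--
--         # Als er geen minimale index tussen zit, verwijder de tweede maximale index
--         if not min_between:
--             del max_indices[i + 1]
--         else:
--             i += 1
--
--     # Itereer over de minimum indices
--     i_1 = 0
--     while i_1 < len(min_indices) - 1:
--         min_index_1 = min_indices[i_1]
--         next_min_index_1 = min_indices[i_1 + 1]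
--
--         # Controleer of er een maximale index tussen zit
--         max_between_1 = False
--         for max_index_1 in max_indices:
--             if min_index_1 < max_index_1 < next_min_index_1:
--                 max_between_1 = True
--                 break
--
--         # Als er geen maximale index tussen zit, verwijder de eerste minimale index
--         if not max_between_1:
--             del min_indices[i_1]
--         else:
--             i_1 += 1
--
--     return max_indices, min_indices
-- ===== SOURCE B (Python) =====
-- def find_max_min_indices(values_filtered, derivative, threshold_derivative):
--     # Single-pass detection over a window of three, then linear two-pointer pruning.
--     n = len(values_filtered)
--     d = derivative[:n]
--     maxima = []
--     minima = []
--     for i, (a, b, c) in enumerate(zip(d, d[1:], d[2:]), start=1):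
--         if b > threshold_derivative and b > a and b > c:
--             maxima.append(i)
--         elif b < -threshold_derivative and b < a and b < c:
--             minima.append(i)
--
--     # Keep the first maximum; keep a later maximum only if some minimum lies
--     # strictly between the last kept maximum and it (two-pointer over minima).
--     kept_max = []
--     j = 0
--     for m in maxima:
--         if not kept_max:
--             kept_max.append(m)
--         else:
--             while j < len(minima) and minima[j] <= kept_max[-1]:
--                 j += 1
--             if j < len(minima) and minima[j] < m:
--                 kept_max.append(m)
--
--     # Keep the last minimum; keep an earlier minimum only if some kept maximum
--     # lies strictly between it and the next original minimum.
--     kept_min = []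
--     j = 0
--     for a, b in zip(minima, minima[1:]):
--         while j < len(kept_max) and kept_max[j] <= a:
--             j += 1
--         if j < len(kept_max) and kept_max[j] < b:
--             kept_min.append(a)
--     if minima:
--         kept_min.append(minima[-1])
--     return kept_max, kept_min
-- ===== Notes on version B (the rewrite author's own statement) =====
-- stated objective: faster
-- what changed: Detection becomes a zip-of-three-windows pass, and both pruning phases replace A's repeated inner scans over the opposite-extrema list plus O(m) list deletions with a single rebuild pass that advances a monotone pointer into the sorted opposite list, collecting kept indices instead of deleting.
import Mathlib
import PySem

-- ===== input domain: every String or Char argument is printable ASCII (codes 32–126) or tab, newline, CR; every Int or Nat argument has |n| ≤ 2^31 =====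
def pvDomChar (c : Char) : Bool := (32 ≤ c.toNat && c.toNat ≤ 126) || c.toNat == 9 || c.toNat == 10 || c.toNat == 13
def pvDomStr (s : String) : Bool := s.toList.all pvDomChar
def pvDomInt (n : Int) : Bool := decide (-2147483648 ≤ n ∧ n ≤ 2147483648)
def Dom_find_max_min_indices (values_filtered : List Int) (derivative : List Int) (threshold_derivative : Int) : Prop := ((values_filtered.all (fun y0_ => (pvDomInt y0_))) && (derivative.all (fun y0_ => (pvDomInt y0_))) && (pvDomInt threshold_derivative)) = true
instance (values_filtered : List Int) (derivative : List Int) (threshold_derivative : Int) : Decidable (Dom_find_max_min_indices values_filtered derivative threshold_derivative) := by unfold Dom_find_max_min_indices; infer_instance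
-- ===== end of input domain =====

-- B replaces A's inner min/max rescans and O(m^2) list deletions by a single-pass
-- rebuild with a monotone pointer into the (sorted) opposite-extrema list.

-- ===== PORT A =====

-- the detection for-loop of A, reading derivative[i-1], derivative[i], derivative[i+1]
def detectA (derivative : List Int) (threshold_derivative : Int) (n : Int) : List Int × List Int :=
  (PySem.List.pyRange 1 (n - 1) 1).foldl (fun st i =>
    let di := PySem.List.pyGetD derivative i 0
    let dm := PySem.List.pyGetD derivative (i - 1) 0
    let dp := PySem.List.pyGetD derivative (i + 1) 0
    if di > threshold_derivative ∧ di > dm ∧ di > dp then (st.1 ++ [i], st.2)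
    else if di < -threshold_derivative ∧ di < dm ∧ di < dp then (st.1, st.2 ++ [i])
    else st) ([], [])

-- A's first while loop: state = (current max_indices list, cursor i); 'del' is eraseIdx
def loopMaxA (min_indices : List Int) (max_indices : List Int) (i : Nat) : List Int :=
  if h : i + 1 < max_indices.length then
    let max_index := max_indices[i]'(by omega)
    let next_max_index := max_indices[i + 1]'h
    let min_between := min_indices.any (fun m => max_index < m && m < next_max_index)
    if min_between then loopMaxA min_indices max_indices (i + 1)
    else loopMaxA min_indices (max_indices.eraseIdx (i + 1)) i
  else max_indices
termination_by max_indices.length - i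
decreasing_by
  · omega
  · simp [List.length_eraseIdx, h]; omega

-- A's second while loop (deletes the FIRST of the pair when no max lies between)
def loopMinA (max_indices : List Int) (min_indices : List Int) (i1 : Nat) : List Int :=
  if h : i1 + 1 < min_indices.length then
    let min_index_1 := min_indices[i1]'(by omega)
    let next_min_index_1 := min_indices[i1 + 1]'h
    let max_between_1 := max_indices.any (fun m => min_index_1 < m && m < next_min_index_1)
    if max_between_1 then loopMinA max_indices min_indices (i1 + 1)
    else loopMinA max_indices (min_indices.eraseIdx i1) i1
  else min_indices
termination_by min_indices.length - i1
decreasing_by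
  · omega
  · have h' : i1 < min_indices.length := by omega
    simp [List.length_eraseIdx, h']; omega

def find_max_min_indices (values_filtered : List Int) (derivative : List Int) (threshold_derivative : Int) : List Int × List Int :=
  let st := detectA derivative threshold_derivative (values_filtered.length : Int)
  let max_indices := loopMaxA st.2 st.1 0
  let min_indices := loopMinA max_indices st.2 0
  (max_indices, min_indices)

-- ===== PORT B =====

-- B's inner 'while j < len(xs) and xs[j] <= bound: j += 1'
def skipLE (xs : List Int) (bound : Int) (j : Nat) : Nat :=
  if h : j < xs.length then
    if xs[j] ≤ bound then skipLE xs bound (j + 1) else j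
  else j
termination_by xs.length - j

-- B's detection: enumerate over the zipped window of three
def detectB (d : List Int) (threshold_derivative : Int) : List Int × List Int :=
  let triples := (d.zip (d.drop 1)).zip (d.drop 2)
  (PySem.List.enumerate triples 1).foldl (fun st p =>
    let i := p.1
    let a := p.2.1.1
    let b := p.2.1.2
    let c := p.2.2
    if b > threshold_derivative ∧ b > a ∧ b > c then (st.1 ++ [i], st.2)
    else if b < -threshold_derivative ∧ b < a ∧ b < c then (st.1, st.2 ++ [i])
    else st) ([], [])

-- B's max pruning: single pass over maxima, pointer j into minima
def pruneMaxB (minima : List Int) (maxima : List Int) : List Int :=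
  (maxima.foldl (fun (st : List Int × Nat) m =>
    if st.1 = [] then (st.1 ++ [m], st.2)
    else
      let j := skipLE minima st.1.getLast! st.2
      if j < minima.length ∧ minima.getD j 0 < m then (st.1 ++ [m], j) else (st.1, j))
    ([], 0)).1

-- B's min pruning: pass over consecutive original pairs of minima, pointer j into kept_max
def pruneMinB (kept_max : List Int) (minima : List Int) : List Int :=
  let kept := (minima.zip (minima.drop 1)).foldl (fun (st : List Int × Nat) p =>
    let j := skipLE kept_max p.1 st.2
    if j < kept_max.length ∧ kept_max.getD j 0 < p.2 then (st.1 ++ [p.1], j) else (st.1, j))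
    ([], 0)
  if minima ≠ [] then kept.1 ++ [minima.getLast!] else kept.1

def find_max_min_indices_alt (values_filtered : List Int) (derivative : List Int) (threshold_derivative : Int) : List Int × List Int :=
  let d := PySem.List.slice derivative none (some (values_filtered.length : Int))
  let st := detectB d threshold_derivative
  let kept_max := pruneMaxB st.2 st.1
  (kept_max, pruneMinB kept_max st.2)

-- ===== PRECONDITION & SPEC =====
-- Pre_ is exactly where A returns: the detection loop raises IndexError when the
-- derivative is shorter than values_filtered, except that with exactly one missing
-- element the last iteration may avoid reading derivative[n-1] by short-circuit —
-- the third disjunct states that short-circuit condition literally.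
def Pre_find_max_min_indices (values_filtered : List Int) (derivative : List Int) (threshold_derivative : Int) : Prop :=
  values_filtered.length < 3 ∨ values_filtered.length ≤ derivative.length ∨
  (derivative.length + 1 = values_filtered.length ∧
    ¬(derivative.getD (values_filtered.length - 2) 0 > threshold_derivative ∧
      derivative.getD (values_filtered.length - 2) 0 > derivative.getD (values_filtered.length - 3) 0) ∧
    ¬(derivative.getD (values_filtered.length - 2) 0 < -threshold_derivative ∧
      derivative.getD (values_filtered.length - 2) 0 < derivative.getD (values_filtered.length - 3) 0))
instance (values_filtered : List Int) (derivative : List Int) (threshold_derivative : Int) : Decidable (Pre_find_max_min_indices values_filtered derivative threshold_derivative) := by unfold Pre_find_max_min_indices; infer_instance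

def pvWitness_find_max_min_indices : List Int × List Int × Int :=
  ([0, 1, 3, 2, 1, 0, 2, 0], [1, 2, -1, -1, -1, 2, -2, 0], 0)

def Spec_find_max_min_indices (values_filtered : List Int) (derivative : List Int) (threshold_derivative : Int) (out : List Int × List Int) : Prop := out = find_max_min_indices_alt values_filtered derivative threshold_derivative
instance (values_filtered : List Int) (derivative : List Int) (threshold_derivative : Int) (out : List Int × List Int) : Decidable (Spec_find_max_min_indices values_filtered derivative threshold_derivative out) := by unfold Spec_find_max_min_indices; infer_instance

-- ===== CLAIM (what is proved, stated in full; the proofs are below) =====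
def Claim_equal_find_max_min_indices : Prop := ∀ (values_filtered : List Int) (derivative : List Int) (threshold_derivative : Int), Dom_find_max_min_indices values_filtered derivative threshold_derivative → Pre_find_max_min_indices values_filtered derivative threshold_derivative → Spec_find_max_min_indices values_filtered derivative threshold_derivative (find_max_min_indices values_filtered derivative threshold_derivative)

-- ===== LEMMAS AND PROOFS =====

-- canonical form of the detection phase (index arithmetic made Nat-explicit)
def detC (d : List Int) (t : Int) (len : Nat) : List Int × List Int :=
  (List.range (len - 2)).foldl (fun st k =>
    let a := d.getD k 0
    let b := d.getD (k + 1) 0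
    let c := d.getD (k + 2) 0
    if b > t ∧ b > a ∧ b > c then (st.1 ++ [1 + (k : Int)], st.2)
    else if b < -t ∧ b < a ∧ b < c then (st.1, st.2 ++ [1 + (k : Int)])
    else st) ([], [])
lemma detectA_eq_detC (d : List Int) (t : Int) (n : Nat) :
    detectA d t (n : Int) = detC d t n := by
  unfold detectA detC
  rw [PySem.List.pyRange_one, List.foldl_map]
  have hn : ((n : Int) - 1 - 1).toNat = n - 2 := by omega
  rw [hn]
  apply PySem.List.foldl_congr_mem
  intro acc k _
  have h1 : (1 : Int) + (k : Int) - 1 = ((k : Nat) : Int) := by ring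
  have h2 : (1 : Int) + (k : Int) = (((k + 1 : Nat)) : Int) := by push_cast; ring
  have h3 : (1 : Int) + (k : Int) + 1 = (((k + 2 : Nat)) : Int) := by push_cast; ring
  simp only [h1]
  rw [h2]
  have h4 : (((k + 1 : Nat)) : Int) + 1 = (((k + 2 : Nat)) : Int) := by push_cast; ring
  rw [h4]
  simp only [PySem.List.pyGetD_natCast]

lemma enumerate_eq_range_map {α : Type} [Inhabited α] (xs : List α) (s : Int) :
    PySem.List.enumerate xs s = (List.range xs.length).map (fun (k : Nat) => (s + (k : Int), xs.getD k default)) := by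
  apply List.ext_getElem
  · simp [PySem.List.length_enumerate]
  · intro k h1 h2
    simp only [PySem.List.length_enumerate] at h1
    simp [PySem.List.getElem_enumerate, List.getElem_range, List.getD_eq_getElem?_getD,
      List.getElem?_eq_getElem h1]

lemma detectB_eq_detC (d : List Int) (t : Int) :
    detectB d t = detC d t d.length := by
  unfold detectB detC
  dsimp only
  have hlen : ((d.zip (d.drop 1)).zip (d.drop 2)).length = d.length - 2 := by
    simp [List.length_zip]; omega
  rw [enumerate_eq_range_map, List.foldl_map, hlen]
  apply PySem.List.foldl_congr_mem
  intro acc k hk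
  simp only [List.mem_range] at hk
  have hk2 : k + 2 < d.length := by omega
  have htrip : ((d.zip (d.drop 1)).zip (d.drop 2)).getD k default =
      ((d.getD k 0, d.getD (k + 1) 0), d.getD (k + 2) 0) := by
    have hkt : k < ((d.zip (d.drop 1)).zip (d.drop 2)).length := by omega
    rw [List.getD_eq_getElem _ _ hkt, List.getElem_zip, List.getElem_zip,
        List.getD_eq_getElem _ _ (show k < d.length by omega),
        List.getD_eq_getElem _ _ (show k + 1 < d.length by omega),
        List.getD_eq_getElem _ _ hk2]
    simp only [List.getElem_drop, Prod.mk.injEq]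
    refine ⟨⟨trivial, ?_⟩, ?_⟩ <;> · congr 1; omega
  rw [htrip]

lemma detC_sorted_aux (d : List Int) (t : Int) (ks : List Nat) (st : List Int × List Int)
    (hks : ks.Pairwise (· < ·))
    (h1 : ∀ x ∈ st.1, ∀ k ∈ ks, x < 1 + (k : Int)) (h2 : ∀ x ∈ st.2, ∀ k ∈ ks, x < 1 + (k : Int))
    (hs1 : st.1.Pairwise (· < ·)) (hs2 : st.2.Pairwise (· < ·)) :
    (ks.foldl (fun st k =>
      let a := d.getD k 0
      let b := d.getD (k + 1) 0
      let c := d.getD (k + 2) 0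
      if b > t ∧ b > a ∧ b > c then (st.1 ++ [1 + (k : Int)], st.2)
      else if b < -t ∧ b < a ∧ b < c then (st.1, st.2 ++ [1 + (k : Int)])
      else st) st).1.Pairwise (· < ·) ∧
    (ks.foldl (fun st k =>
      let a := d.getD k 0
      let b := d.getD (k + 1) 0
      let c := d.getD (k + 2) 0
      if b > t ∧ b > a ∧ b > c then (st.1 ++ [1 + (k : Int)], st.2)
      else if b < -t ∧ b < a ∧ b < c then (st.1, st.2 ++ [1 + (k : Int)])
      else st) st).2.Pairwise (· < ·) := by
  induction ks generalizing st with
  | nil => exact ⟨hs1, hs2⟩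
  | cons k ks ih =>
    simp only [List.foldl_cons]
    rw [List.pairwise_cons] at hks
    apply ih _ hks.2
    · intro x hx k' hk'
      split_ifs at hx with hc1 hc2
      · rcases List.mem_append.1 hx with h | h
        · exact h1 x h k' (by simp [hk'])
        · simp at h; subst h
          have := hks.1 k' hk'; omega
      · exact h1 x hx k' (by simp [hk'])
      · exact h1 x hx k' (by simp [hk'])
    · intro x hx k' hk'
      split_ifs at hx with hc1 hc2
      · exact h2 x hx k' (by simp [hk'])
      · rcases List.mem_append.1 hx with h | h
        · exact h2 x h k' (by simp [hk'])
        · simp at h; subst h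
          have := hks.1 k' hk'; omega
      · exact h2 x hx k' (by simp [hk'])
    · dsimp only; split_ifs with hc1 hc2
      · refine List.pairwise_append.2 ⟨hs1, List.pairwise_singleton _ _, ?_⟩
        intro x hx y hy; simp at hy; subst hy
        exact h1 x hx k (by simp)
      · exact hs1
      · exact hs1
    · dsimp only; split_ifs with hc1 hc2
      · exact hs2
      · refine List.pairwise_append.2 ⟨hs2, List.pairwise_singleton _ _, ?_⟩
        intro x hx y hy; simp at hy; subst hy
        exact h2 x hx k (by simp)
      · exact hs2

lemma detC_sorted (d : List Int) (t : Int) (len : Nat) :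
    (detC d t len).1.Pairwise (· < ·) ∧ (detC d t len).2.Pairwise (· < ·) := by
  unfold detC
  exact detC_sorted_aux d t _ _ (List.pairwise_lt_range) (by simp) (by simp)
    List.Pairwise.nil List.Pairwise.nil

-- canonical form of the max pruning (last kept element as explicit state)
def goMax (mins : List Int) : Option Int → List Int → List Int
  | _, [] => []
  | none, m :: r => m :: goMax mins (some m) r
  | some a, m :: r =>
      if mins.any (fun x => a < x && x < m) then m :: goMax mins (some m) r
      else goMax mins (some a) r
-- canonical form of the min pruning
def goMin (maxs : List Int) : List Int → List Int
  | [] => []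
  | [a] => [a]
  | a :: b :: rest =>
      (if maxs.any (fun x => a < x && x < b) then [a] else []) ++ goMin maxs (b :: rest)

lemma loopMaxA_aux (mins : List Int) (rest : List Int) :
    ∀ (pre : List Int) (a : Int),
    loopMaxA mins (pre ++ a :: rest) pre.length = pre ++ a :: goMax mins (some a) rest := by
  induction rest with
  | nil =>
    intro pre a
    rw [loopMaxA]
    simp [goMax]
  | cons b rest ih =>
    intro pre a
    rw [loopMaxA]
    have hl : pre.length + 1 < (pre ++ a :: b :: rest).length := by simp
    rw [dif_pos hl]
    have ha : (pre ++ a :: b :: rest)[pre.length]'(by omega) = a := by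
      simp [List.getElem_append_right (Nat.le_refl pre.length)]
    have hb : (pre ++ a :: b :: rest)[pre.length + 1]'hl = b := by
      rw [List.getElem_append_right (by omega)]
      simp
    simp only [ha, hb]
    by_cases hc : (mins.any fun m => decide (a < m) && decide (m < b)) = true
    · rw [if_pos hc]
      have : pre.length + 1 = (pre ++ [a]).length := by simp
      rw [this, show pre ++ a :: b :: rest = (pre ++ [a]) ++ b :: rest by simp, ih]
      simp [goMax, hc]
    · rw [if_neg hc]
      have herase : (pre ++ a :: b :: rest).eraseIdx (pre.length + 1) = pre ++ a :: rest := by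
        rw [List.eraseIdx_append_of_length_le (by omega)]
        simp
      rw [herase, ih]
      simp [goMax, hc]

lemma loopMaxA_eq_goMax (mins : List Int) (xs : List Int) :
    loopMaxA mins xs 0 = goMax mins none xs := by
  cases xs with
  | nil => rw [loopMaxA]; simp [goMax]
  | cons a rest =>
    have := loopMaxA_aux mins rest [] a
    simpa [goMax] using this

lemma loopMinA_aux (maxs : List Int) (rest : List Int) :
    ∀ (pre : List Int) (a : Int),
    loopMinA maxs (pre ++ a :: rest) pre.length = pre ++ goMin maxs (a :: rest) := by
  induction rest with
  | nil =>
    intro pre a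
    rw [loopMinA]
    simp [goMin]
  | cons b rest ih =>
    intro pre a
    rw [loopMinA]
    have hl : pre.length + 1 < (pre ++ a :: b :: rest).length := by simp
    rw [dif_pos hl]
    have ha : (pre ++ a :: b :: rest)[pre.length]'(by omega) = a := by
      simp [List.getElem_append_right (Nat.le_refl pre.length)]
    have hb : (pre ++ a :: b :: rest)[pre.length + 1]'hl = b := by
      rw [List.getElem_append_right (by omega)]
      simp
    simp only [ha, hb]
    by_cases hc : (maxs.any fun m => decide (a < m) && decide (m < b)) = true
    · rw [if_pos hc]
      have : pre.length + 1 = (pre ++ [a]).length := by simp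
      rw [this, show pre ++ a :: b :: rest = (pre ++ [a]) ++ b :: rest by simp, ih]
      simp [goMin, hc]
    · rw [if_neg hc]
      have herase : (pre ++ a :: b :: rest).eraseIdx pre.length = pre ++ b :: rest := by
        rw [List.eraseIdx_append_of_length_le (by omega)]
        simp
      rw [herase, ih]
      simp [goMin, hc]

lemma loopMinA_eq_goMin (maxs : List Int) (xs : List Int) :
    loopMinA maxs xs 0 = goMin maxs xs := by
  cases xs with
  | nil => rw [loopMinA]; simp [goMin]
  | cons a rest =>
    have := loopMinA_aux maxs rest [] a
    simpa using this

-- min pruning with the final (always kept) element removed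
def goMinBody (maxs : List Int) : List Int → List Int
  | a :: b :: rest => (if maxs.any (fun x => a < x && x < b) then [a] else []) ++ goMinBody maxs (b :: rest)
  | _ => []

lemma skipLE_spec (xs : List Int) (a : Int) (j : Nat)
    (hj : j ≤ xs.length) (hpre : ∀ k, k < j → xs.getD k 0 ≤ a) :
    j ≤ skipLE xs a j ∧ skipLE xs a j ≤ xs.length ∧
    (∀ k, k < skipLE xs a j → xs.getD k 0 ≤ a) ∧
    (skipLE xs a j < xs.length → a < xs.getD (skipLE xs a j) 0) := by
  fun_induction skipLE xs a j with
  | case1 j h hle ih =>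
    have := ih (by omega) (by
      intro k hk
      rcases Nat.lt_or_ge k j with h' | h'
      · exact hpre k h'
      · have : k = j := by omega
        subst this
        rw [List.getD_eq_getElem _ _ h]; exact hle)
    exact ⟨by omega, this.2.1, this.2.2.1, this.2.2.2⟩
  | case2 j h hgt =>
    refine ⟨le_refl _, by omega, hpre, ?_⟩
    intro _
    rw [List.getD_eq_getElem _ _ h]; omega
  | case3 j h =>
    exact ⟨le_refl _, by omega, hpre, by omega⟩

lemma skip_between (xs : List Int) (hs : xs.Pairwise (· < ·)) (a m : Int) (j' : Nat)
    (h1 : j' ≤ xs.length) (h2 : ∀ k, k < j' → xs.getD k 0 ≤ a)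
    (h3 : j' < xs.length → a < xs.getD j' 0) :
    (j' < xs.length ∧ xs.getD j' 0 < m) ↔ (xs.any fun x => decide (a < x) && decide (x < m)) = true := by
  constructor
  · rintro ⟨hl, hm⟩
    rw [List.any_eq_true]
    exact ⟨xs.getD j' 0, by rw [List.getD_eq_getElem _ _ hl]; exact List.getElem_mem hl,
      by simp only [Bool.and_eq_true, decide_eq_true_eq]; exact ⟨h3 hl, hm⟩⟩
  · intro hany
    rw [List.any_eq_true] at hany
    obtain ⟨x, hx, hcond⟩ := hany
    simp only [Bool.and_eq_true, decide_eq_true_eq] at hcond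
    obtain ⟨k, hk, hxk⟩ := List.mem_iff_getElem.1 hx
    have hjk : j' ≤ k := by
      by_contra hlt
      have := h2 k (by omega)
      rw [List.getD_eq_getElem _ _ hk] at this
      omega
    refine ⟨by omega, ?_⟩
    rcases Nat.eq_or_lt_of_le hjk with he | hlt
    · rw [List.getD_eq_getElem _ _ (by omega)]
      subst he; rw [hxk]; exact hcond.2
    · have := (List.pairwise_iff_getElem.1 hs) j' k (by omega) hk hlt
      rw [List.getD_eq_getElem _ _ (by omega)]
      rw [hxk] at this; omega

lemma pruneMaxB_aux (mins : List Int) (hm : mins.Pairwise (· < ·)) (rest : List Int) :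
    ∀ (kept : List Int) (j : Nat) (a : Int),
    kept ≠ [] → kept.getLast! = a → j ≤ mins.length →
    (∀ k, k < j → mins.getD k 0 ≤ a) →
    (a :: rest).Pairwise (· < ·) →
    (rest.foldl (fun (st : List Int × Nat) m =>
      if st.1 = [] then (st.1 ++ [m], st.2)
      else
        let j := skipLE mins st.1.getLast! st.2
        if j < mins.length ∧ mins.getD j 0 < m then (st.1 ++ [m], j) else (st.1, j))
      (kept, j)).1 = kept ++ goMax mins (some a) rest := by
  induction rest with
  | nil => intro kept j a _ _ _ _ _; simp [goMax]
  | cons m r ih =>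
    intro kept j a hne hlast hjle hjpre hsort
    rw [List.foldl_cons]
    rw [if_neg (by simp [hne])]
    simp only [hlast]
    obtain ⟨hs1, hs2, hs3, hs4⟩ := skipLE_spec mins a j hjle hjpre
    rw [List.pairwise_cons] at hsort
    have ham : a < m := hsort.1 m (by simp)
    by_cases hc : (mins.any fun x => decide (a < x) && decide (x < m)) = true
    · rw [if_pos ((skip_between mins hm a m _ hs2 hs3 hs4).2 hc)]
      rw [ih (kept ++ [m]) _ m (by simp) (by simp) hs2
        (fun k hk => le_trans (hs3 k hk) (le_of_lt ham))
        hsort.2]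
      simp [goMax, hc]
    · rw [if_neg (by rw [skip_between mins hm a m _ hs2 hs3 hs4]; exact hc)]
      rw [ih kept _ a hne hlast hs2 hs3
        (by rw [List.pairwise_cons]; exact ⟨fun y hy => hsort.1 y (by simp [hy]), (List.pairwise_cons.1 hsort.2).2⟩)]
      simp [goMax, hc]

lemma pruneMaxB_eq_goMax (mins : List Int) (xs : List Int)
    (hm : mins.Pairwise (· < ·)) (hx : xs.Pairwise (· < ·)) :
    pruneMaxB mins xs = goMax mins none xs := by
  unfold pruneMaxB
  cases xs with
  | nil => simp [goMax]
  | cons a rest =>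
    rw [List.foldl_cons, if_pos rfl]
    rw [List.pairwise_cons] at hx
    have := pruneMaxB_aux mins hm rest ([] ++ [a]) 0 a (by simp) (by simp) (by omega)
      (by omega) (by rw [List.pairwise_cons]; exact hx)
    rw [this]
    simp [goMax]

lemma goMinBody_spec (maxs : List Int) : ∀ (xs : List Int), xs ≠ [] →
    goMin maxs xs = goMinBody maxs xs ++ [xs.getLast!] := by
  intro xs
  induction xs with
  | nil => intro h; exact absurd rfl h
  | cons a rest ih =>
    intro _
    cases rest with
    | nil => simp [goMin, goMinBody]
    | cons b r =>
      rw [goMin, goMinBody, ih (by simp)]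
      simp

lemma pruneMinB_aux (maxs : List Int) (hm : maxs.Pairwise (· < ·)) :
    ∀ (xs : List Int) (kept : List Int) (j : Nat),
    xs.Pairwise (· < ·) → j ≤ maxs.length →
    (∀ hne : xs ≠ [], ∀ k, k < j → maxs.getD k 0 ≤ xs.head (by exact hne)) →
    ((xs.zip (xs.drop 1)).foldl (fun (st : List Int × Nat) p =>
      let j := skipLE maxs p.1 st.2
      if j < maxs.length ∧ maxs.getD j 0 < p.2 then (st.1 ++ [p.1], j) else (st.1, j))
      (kept, j)).1 = kept ++ goMinBody maxs xs := by
  intro xs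
  induction xs with
  | nil => intro kept j _ _ _; simp [goMinBody]
  | cons a rest ih =>
    intro kept j hsort hjle hjpre
    cases rest with
    | nil => simp [goMinBody]
    | cons b r =>
      have hzip : (a :: b :: r).zip ((a :: b :: r).drop 1) = (a, b) :: (b :: r).zip (r) := by
        simp
      rw [hzip, List.foldl_cons]
      rw [List.pairwise_cons] at hsort
      have hab : a < b := hsort.1 b (by simp)
      obtain ⟨hs1, hs2, hs3, hs4⟩ := skipLE_spec maxs a j hjle (hjpre (by simp))
      have hzip2 : (b :: r).zip ((b :: r).drop 1) = (b :: r).zip r := by simp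
      by_cases hc : (maxs.any fun x => decide (a < x) && decide (x < b)) = true
      · rw [if_pos ((skip_between maxs hm a b _ hs2 hs3 hs4).2 hc)]
        have := ih (kept ++ [a]) (skipLE maxs a j) hsort.2 hs2
          (fun _ k hk => le_trans (hs3 k hk) (le_of_lt hab))
        rw [hzip2] at this
        rw [this, goMinBody]
        simp [hc]
      · rw [if_neg (by rw [skip_between maxs hm a b _ hs2 hs3 hs4]; exact hc)]
        have := ih kept (skipLE maxs a j) hsort.2 hs2
          (fun _ k hk => le_trans (hs3 k hk) (le_of_lt hab))
        rw [hzip2] at this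
        rw [this, goMinBody]
        simp [hc]

lemma pruneMinB_eq_goMin (maxs : List Int) (xs : List Int)
    (hm : maxs.Pairwise (· < ·)) (hx : xs.Pairwise (· < ·)) :
    pruneMinB maxs xs = goMin maxs xs := by
  unfold pruneMinB
  cases hxe : xs with
  | nil => simp [goMin]
  | cons a rest =>
    rw [← hxe]
    have hne : xs ≠ [] := by rw [hxe]; simp
    rw [if_pos hne]
    rw [pruneMinB_aux maxs hm xs [] 0 hx (by omega) (by omega)]
    rw [goMinBody_spec maxs xs hne]
    simp

def Pre' (n : Nat) (derivative : List Int) (t : Int) : Prop :=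
  n < 3 ∨ n ≤ derivative.length ∨
  (derivative.length + 1 = n ∧
    ¬(derivative.getD (n - 2) 0 > t ∧ derivative.getD (n - 2) 0 > derivative.getD (n - 3) 0) ∧
    ¬(derivative.getD (n - 2) 0 < -t ∧ derivative.getD (n - 2) 0 < derivative.getD (n - 3) 0))

lemma goMax_sublist (mins : List Int) (o : Option Int) (xs : List Int) :
    (goMax mins o xs).Sublist xs := by
  induction xs generalizing o with
  | nil => cases o <;> simp [goMax]
  | cons m r ih =>
    cases o with
    | none => rw [goMax]; exact (ih (some m)).cons₂ m
    | some a =>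
      rw [goMax]
      split_ifs
      · exact (ih (some m)).cons₂ m
      · exact (ih (some a)).cons m

lemma detC_take_eq (d : List Int) (t : Int) (n : Nat) (h : Pre' n d t) :
    detC d t n = detC (d.take n) t (d.take n).length := by
  rcases Nat.lt_or_ge d.length n with hlen | hlen
  · -- derivative shorter: Pre' forces len + 1 = n (or n < 3) and the last step a no-op
    have htk : d.take n = d := List.take_of_length_le (by omega)
    rw [htk]
    rcases Nat.lt_or_ge n 3 with hn3 | hn3
    · unfold detC
      rw [show n - 2 = 0 from by omega, show d.length - 2 = 0 from by omega]
    · rcases h with h3 | hge | ⟨hl, hg1, hg2⟩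
      · omega
      · omega
      · unfold detC
        have e1 : n - 2 = (d.length - 2) + 1 := by omega
        rw [e1, List.range_succ, List.foldl_append]
        have e2 : d.length - 2 = n - 3 := by omega
        simp only [List.foldl_cons, List.foldl_nil]
        have hb1 : d.length - 2 + 1 = n - 2 := by omega
        have hb2 : d.length - 2 + 2 = n - 1 := by omega
        rw [hb1, hb2, e2]
        rw [if_neg (fun hcon => hg1 ⟨hcon.1, hcon.2.1⟩),
            if_neg (fun hcon => hg2 ⟨hcon.1, hcon.2.1⟩)]
  · have htk : (d.take n).length = n := by simp; omega
    rw [htk]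
    unfold detC
    apply PySem.List.foldl_congr_mem
    intro acc k hk
    simp only [List.mem_range] at hk
    have g : ∀ m, m < n → (d.take n).getD m 0 = d.getD m 0 := by
      intro m hm
      rw [List.getD_eq_getElem _ _ (by omega : m < d.length),
        List.getD_eq_getElem _ _ (by rw [htk]; omega),
        List.getElem_take]
    rw [g k (by omega), g (k+1) (by omega), g (k+2) (by omega)]

-- ===== VERDICT (by name: the statement is the Claim_ definition above) =====
theorem find_max_min_indices_spec : Claim_equal_find_max_min_indices := by
  intro vf d t _ hpre
  unfold Spec_find_max_min_indices
  unfold find_max_min_indices find_max_min_indices_alt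
  dsimp only
  rw [PySem.List.slice_to_natCast]
  rw [detectA_eq_detC, detectB_eq_detC]
  have hPre' : Pre' vf.length d t := hpre
  rw [← detC_take_eq d t vf.length hPre']
  obtain ⟨hs1, hs2⟩ := detC_sorted d t vf.length
  have hkm : ((goMax (detC d t vf.length).2 none (detC d t vf.length).1).Pairwise (· < ·)) :=
    List.Pairwise.sublist (goMax_sublist _ _ _) hs1
  rw [loopMaxA_eq_goMax, loopMinA_eq_goMin, pruneMaxB_eq_goMax _ _ hs2 hs1,
      pruneMinB_eq_goMin _ _ hkm hs2]
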